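-- pv_equiv track=rewrite | github.com/mungaihosea/python-matrices | solution.py | IsNonrepeatedRowRec
-- ===== SOURCE A (Python) =====
-- def IsNonrepeatedRowRec(A):
--     if len(A) > 0:
--         if len(A[0]) == len(list(set(A[0]))): #check the first row
--             return True
--         else:
--             A.remove(A[0]) #remove the checked row
--             return IsNonrepeatedRowRec(A) #use recursion until the row has a length of 0
--     else:
--         return False
-- ===== SOURCE B (Python) =====
-- def IsNonrepeatedRowRec(A):
--     # Iterative rewrite: while-loop popping the head row (same mutation of A as
--     # the recursive original); distinctness of a row is tested by sorting it and
--     # checking that no two adjacent elements are equal, instead of building a set.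
--     while len(A) > 0:
--         s = sorted(A[0])
--         if all(s[i] != s[i + 1] for i in range(len(s) - 1)):
--             return True
--         del A[0]
--     return False
-- ===== Notes on version B (the rewrite author's own statement) =====
-- stated objective: alternative
-- what changed: Recursion replaced by a while-loop that pops the head row, and the per-row distinctness test replaced: sort the row and check no adjacent pair is equal, instead of comparing the row length with the size of its set.
import Mathlib
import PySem

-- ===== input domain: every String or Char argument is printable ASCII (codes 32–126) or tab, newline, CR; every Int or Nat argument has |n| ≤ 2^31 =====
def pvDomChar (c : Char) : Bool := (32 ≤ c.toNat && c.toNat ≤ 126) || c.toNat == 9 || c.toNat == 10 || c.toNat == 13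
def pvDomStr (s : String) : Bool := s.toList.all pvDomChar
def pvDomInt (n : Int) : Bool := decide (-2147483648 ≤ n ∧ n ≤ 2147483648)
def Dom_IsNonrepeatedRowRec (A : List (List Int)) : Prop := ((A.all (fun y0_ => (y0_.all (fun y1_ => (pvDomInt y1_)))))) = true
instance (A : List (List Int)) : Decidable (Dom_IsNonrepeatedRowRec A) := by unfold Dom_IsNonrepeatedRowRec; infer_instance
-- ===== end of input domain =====

-- B replaces the recursion by a head-popping loop and tests row distinctness by
-- sorting and comparing adjacent elements instead of building a set (objective:
-- alternative). Both versions mutate the Python argument identically (popping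
-- failed head rows); the equivalence proved here is about the return value.

-- ===== PORT A =====
-- A recurses on the list of rows: check the head row via len(set(...)), else drop it.
def IsNonrepeatedRowRec (A : List (List Int)) : Bool :=
  match A with
  | [] => false
  | r :: rest =>
    if r.length == (PySem.Set.ofList r).length then true
    else IsNonrepeatedRowRec rest

-- ===== PORT B =====
-- all(s[i] != s[i+1] for i in range(len(s)-1)) on the sorted row, as the obvious
-- structural recursion over adjacent pairs.
def noAdjEq (s : List Int) : Bool :=
  match s with
  | a :: b :: t => (a != b) && noAdjEq (b :: t)
  | _ => true

-- the while-loop of Source B: pop the head row until one passes the adjacent test.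
def IsNonrepeatedRowRec_alt (A : List (List Int)) : Bool :=
  match A with
  | [] => false
  | r :: rest =>
    if noAdjEq (PySem.List.sorted r (fun x => x) false) then true
    else IsNonrepeatedRowRec_alt rest

-- ===== PRECONDITION & SPEC =====
def Spec_IsNonrepeatedRowRec (A : List (List Int)) (out : Bool) : Prop := out = IsNonrepeatedRowRec_alt A
instance (A : List (List Int)) (out : Bool) : Decidable (Spec_IsNonrepeatedRowRec A out) := by unfold Spec_IsNonrepeatedRowRec; infer_instance

-- ===== CLAIM (what is proved, stated in full; the proofs are below) =====
def Claim_equal_IsNonrepeatedRowRec : Prop := ∀ (A : List (List Int)), Dom_IsNonrepeatedRowRec A → Spec_IsNonrepeatedRowRec A (IsNonrepeatedRowRec A)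

-- ===== LEMMAS AND PROOFS =====

-- A's per-row test: len(row) == len(set(row)) iff the row has no duplicates.
lemma setLen_eq_iff_nodup (r : List Int) :
    (r.length == (PySem.Set.ofList r).length) = true ↔ r.Nodup := by
  have hperm : (PySem.Set.ofList r).Perm r.dedup := by
    refine (List.perm_ext_iff_of_nodup (PySem.Set.nodup_ofList r) (List.nodup_dedup r)).2 ?_
    intro x
    rw [PySem.Set.mem_ofList, List.mem_dedup]
  have hlen : (PySem.Set.ofList r).length = r.dedup.length := hperm.length_eq
  constructor
  · intro h
    have h' : r.length = r.dedup.length := by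
      have := of_decide_eq_true (by simpa using h)
      omega
    have : r.dedup = r := (r.dedup_sublist).eq_of_length h'.symm
    exact this ▸ List.nodup_dedup r
  · intro h
    have : r.dedup = r := List.Nodup.dedup h
    simp [hlen, this]

lemma noAdjEq_iff_pairwise_lt (s : List Int) (hs : s.Pairwise (· ≤ ·)) :
    noAdjEq s = true ↔ s.Pairwise (· < ·) := by
  induction s with
  | nil => simp [noAdjEq]
  | cons a t ih =>
    cases t with
    | nil => simp [noAdjEq]
    | cons b u =>
      rw [List.pairwise_cons] at hs
      obtain ⟨hab, hbu⟩ := hs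
      have ih' := ih hbu
      constructor
      · intro h
        simp only [noAdjEq, Bool.and_eq_true, bne_iff_ne, ne_eq] at h
        obtain ⟨hne, hrest⟩ := h
        have hlt : a < b := lt_of_le_of_ne (hab b (by simp)) hne
        have hp : (b :: u).Pairwise (· < ·) := ih'.1 hrest
        rw [List.pairwise_cons]
        refine ⟨?_, hp⟩
        intro x hx
        rcases List.mem_cons.1 hx with rfl | hxu
        · exact hlt
        · rw [List.pairwise_cons] at hbu
          exact lt_of_lt_of_le hlt (hbu.1 x hxu)
      · intro h
        rw [List.pairwise_cons] at h
        obtain ⟨halt, hp⟩ := h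
        simp only [noAdjEq, Bool.and_eq_true, bne_iff_ne, ne_eq]
        exact ⟨ne_of_lt (halt b (by simp)), ih'.2 hp⟩

-- B's per-row test on the sorted row iff the row has no duplicates.
lemma noAdjEq_sorted_iff_nodup (r : List Int) :
    noAdjEq (PySem.List.sorted r (fun x => x) false) = true ↔ r.Nodup := by
  set s := PySem.List.sorted r (fun x => x) false with hs
  have hperm : s.Perm r := PySem.List.sorted_perm r (fun x => x) false
  have hple : s.Pairwise (· ≤ ·) := by
    simpa using (PySem.List.sorted_pairwise (xs := r) (key := fun x => x))
  rw [noAdjEq_iff_pairwise_lt s hple]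
  constructor
  · intro h
    exact hperm.nodup_iff.1 (h.imp ne_of_lt)
  · intro h
    have hnd : s.Nodup := hperm.nodup_iff.2 h
    exact (hnd.and hple).imp (fun h => lt_of_le_of_ne h.2 h.1)

-- the two per-row tests agree on every row.
lemma rowCheck_eq (r : List Int) :
    (r.length == (PySem.Set.ofList r).length)
      = noAdjEq (PySem.List.sorted r (fun x => x) false) := by
  rw [Bool.eq_iff_iff, setLen_eq_iff_nodup, noAdjEq_sorted_iff_nodup]

lemma ports_eq (A : List (List Int)) : IsNonrepeatedRowRec A = IsNonrepeatedRowRec_alt A := by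
  induction A with
  | nil => rfl
  | cons r rest ih =>
    simp only [IsNonrepeatedRowRec, IsNonrepeatedRowRec_alt, rowCheck_eq, ih]

-- ===== VERDICT (by name: the statement is the Claim_ definition above) =====
theorem IsNonrepeatedRowRec_spec : Claim_equal_IsNonrepeatedRowRec := by
  intro A _
  unfold Spec_IsNonrepeatedRowRec
  exact ports_eq A
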